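-- pv_equiv track=rewrite | github.com/tqa236/advent-of-code | src/2023/day03/gear_ratios.py | get_valid_coordinates
-- ===== SOURCE A (Python) =====
-- def get_valid_coordinates(
--     row_index, first_column_index, last_column_index, row_length, column_length
-- ):
--     number_coordinates = {
--         (row_index, column)
--         for column in range(first_column_index, last_column_index + 1)
--     }
--     all_coordinates = {
--         (row, column)
--         for row in range(max(0, row_index - 1), min(row_index + 2, row_length))
--         for column in range(
--             max(0, first_column_index - 1), min(last_column_index + 2, column_length)
--         )
--     }
--     return all_coordinates - number_coordinates
-- ===== SOURCE B (Python) =====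
-- def get_valid_coordinates(
--     row_index, first_column_index, last_column_index, row_length, column_length
-- ):
--     low = max(0, first_column_index - 1)
--     high = min(last_column_index + 2, column_length)
--     border = set()
--     if 0 <= row_index - 1 < row_length:
--         border.update((row_index - 1, column) for column in range(low, high))
--     if 0 <= row_index < row_length:
--         border.update(
--             (row_index, column)
--             for column in range(low, min(high, first_column_index))
--         )
--         border.update(
--             (row_index, column)
--             for column in range(max(low, last_column_index + 1), high)
--         )
--     if 0 <= row_index + 1 < row_length:
--         border.update((row_index + 1, column) for column in range(low, high))
--     return border
-- ===== Notes on version B (the rewrite author's own statement) =====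
-- stated objective: alternative
-- what changed: Instead of materialising the full clamped 3-by-width rectangle set plus the number's own cell set and taking a set difference, B emits the border directly: the strip above, the own-row columns left and right of the number (as two ranges), and the strip below.
import Mathlib
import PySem

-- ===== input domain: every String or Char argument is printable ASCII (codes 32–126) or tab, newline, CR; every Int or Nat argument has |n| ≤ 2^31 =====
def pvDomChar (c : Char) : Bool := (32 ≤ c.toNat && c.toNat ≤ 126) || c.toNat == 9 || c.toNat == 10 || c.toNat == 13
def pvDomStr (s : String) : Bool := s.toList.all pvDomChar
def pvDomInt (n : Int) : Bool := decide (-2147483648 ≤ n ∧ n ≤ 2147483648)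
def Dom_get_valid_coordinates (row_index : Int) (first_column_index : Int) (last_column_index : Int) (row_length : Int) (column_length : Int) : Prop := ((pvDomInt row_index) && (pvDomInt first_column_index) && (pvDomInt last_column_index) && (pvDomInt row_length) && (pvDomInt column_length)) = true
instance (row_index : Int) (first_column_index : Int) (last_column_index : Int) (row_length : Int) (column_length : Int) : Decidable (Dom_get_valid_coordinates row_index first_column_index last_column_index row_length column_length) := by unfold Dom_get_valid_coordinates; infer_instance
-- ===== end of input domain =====

-- B builds the border directly (top strip, two own-row column ranges, bottom strip) instead of
-- forming the full 3×width rectangle set and subtracting the number's own cells (objective: alternative).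

-- Set-building helpers shared by both ports: Python's set uses hash-based membership, so these
-- back the membership tests of PySem.Set.update/ofList/diff with a Std.HashSet; they are proved
-- equal to PySem.Set.update/ofList/diff below (pvSetUpdate_eq/pvSetOfList_eq/pvSetDiff_eq).
def pvSetStep (acc : List (Int × Int) × Std.HashSet (Int × Int)) (x : Int × Int) :
    List (Int × Int) × Std.HashSet (Int × Int) :=
  if acc.2.contains x then acc else (x :: acc.1, acc.2.insert x)

def pvSetUpdate (s : PySem.Set (Int × Int)) (xs : List (Int × Int)) : PySem.Set (Int × Int) :=
  (xs.foldl pvSetStep (s.reverse, Std.HashSet.ofList s)).1.reverse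

def pvSetOfList (xs : List (Int × Int)) : PySem.Set (Int × Int) := pvSetUpdate [] xs

def pvSetDiff (s t : PySem.Set (Int × Int)) : PySem.Set (Int × Int) :=
  let ht := Std.HashSet.ofList t
  List.filter (fun x => !ht.contains x) s

-- ===== PORT A =====
-- A: set of all cells of the clamped 3×width rectangle, minus the number's own cells.
def get_valid_coordinates (row_index : Int) (first_column_index : Int) (last_column_index : Int) (row_length : Int) (column_length : Int) : List (Int × Int) :=
  let number_coordinates : PySem.Set (Int × Int) :=
    pvSetOfList ((PySem.List.pyRange first_column_index (last_column_index + 1)).map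
      (fun column => (row_index, column)))
  let all_coordinates : PySem.Set (Int × Int) :=
    pvSetOfList ((PySem.List.pyRange (max 0 (row_index - 1)) (min (row_index + 2) row_length)).flatMap
      (fun row => (PySem.List.pyRange (max 0 (first_column_index - 1)) (min (last_column_index + 2) column_length)).map
        (fun column => (row, column))))
  pvSetDiff all_coordinates number_coordinates

-- ===== PORT B =====
-- B: emit only the border cells: the strip above (if that row exists), then on the number's own
-- row the columns left of the number and right of the number, then the strip below.
def get_valid_coordinates_alt (row_index : Int) (first_column_index : Int) (last_column_index : Int) (row_length : Int) (column_length : Int) : List (Int × Int) :=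
  let low := max 0 (first_column_index - 1)
  let high := min (last_column_index + 2) column_length
  let b1 : PySem.Set (Int × Int) :=
    if 0 ≤ row_index - 1 ∧ row_index - 1 < row_length then
      pvSetUpdate PySem.Set.empty ((PySem.List.pyRange low high).map (fun c => (row_index - 1, c)))
    else PySem.Set.empty
  let b2 : PySem.Set (Int × Int) :=
    if 0 ≤ row_index ∧ row_index < row_length then
      pvSetUpdate
        (pvSetUpdate b1 ((PySem.List.pyRange low (min high first_column_index)).map (fun c => (row_index, c))))
        ((PySem.List.pyRange (max low (last_column_index + 1)) high).map (fun c => (row_index, c)))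
    else b1
  if 0 ≤ row_index + 1 ∧ row_index + 1 < row_length then
    pvSetUpdate b2 ((PySem.List.pyRange low high).map (fun c => (row_index + 1, c)))
  else b2

-- ===== PRECONDITION & SPEC =====
def Spec_get_valid_coordinates (row_index : Int) (first_column_index : Int) (last_column_index : Int) (row_length : Int) (column_length : Int) (out : List (Int × Int)) : Prop := out = get_valid_coordinates_alt row_index first_column_index last_column_index row_length column_length
instance (row_index : Int) (first_column_index : Int) (last_column_index : Int) (row_length : Int) (column_length : Int) (out : List (Int × Int)) : Decidable (Spec_get_valid_coordinates row_index first_column_index last_column_index row_length column_length out) := by unfold Spec_get_valid_coordinates; infer_instance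

-- ===== CLAIM (what is proved, stated in full; the proofs are below) =====
def Claim_equal_get_valid_coordinates : Prop := ∀ (row_index : Int) (first_column_index : Int) (last_column_index : Int) (row_length : Int) (column_length : Int), Dom_get_valid_coordinates row_index first_column_index last_column_index row_length column_length → Spec_get_valid_coordinates row_index first_column_index last_column_index row_length column_length (get_valid_coordinates row_index first_column_index last_column_index row_length column_length)

-- ===== LEMMAS AND PROOFS =====

-- Row-major order on cells: both ports list their cells in this strict order.
def pvLex (p q : Int × Int) : Prop := p.1 < q.1 ∨ (p.1 = q.1 ∧ p.2 < q.2)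

lemma pvLex_asym (a b : Int × Int) (h1 : pvLex a b) (h2 : pvLex b a) : False := by
  unfold pvLex at h1 h2; omega

-- Two lists strictly sorted by the same asymmetric relation with the same members are equal.
lemma pv_eq_of_pairwise {α : Type} {r : α → α → Prop} (asym : ∀ a b, r a b → r b a → False) :
    ∀ (xs ys : List α), xs.Pairwise r → ys.Pairwise r → (∀ a, a ∈ xs ↔ a ∈ ys) → xs = ys := by
  intro xs
  induction xs with
  | nil =>
    intro ys _ _ hmem
    cases ys with
    | nil => rfl
    | cons y ys => exact absurd ((hmem y).mpr (List.mem_cons_self)) (List.not_mem_nil)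
  | cons x xs ih =>
    intro ys hx hy hmem
    cases ys with
    | nil => exact absurd ((hmem x).mp (List.mem_cons_self)) (List.not_mem_nil)
    | cons y ys =>
      have hxy : x = y := by
        by_contra hne
        have h1 : x ∈ y :: ys := (hmem x).mp (List.mem_cons_self)
        have h2 : y ∈ x :: xs := (hmem y).mpr (List.mem_cons_self)
        rcases List.mem_cons.mp h1 with h | h
        · exact hne h
        · rcases List.mem_cons.mp h2 with h' | h'
          · exact hne h'.symm
          · exact asym x y ((List.pairwise_cons.mp hx).1 y h') ((List.pairwise_cons.mp hy).1 x h)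
      subst hxy
      have htail : ∀ a, a ∈ xs ↔ a ∈ ys := by
        intro a
        constructor
        · intro ha
          have hr : r x a := (List.pairwise_cons.mp hx).1 a ha
          rcases List.mem_cons.mp ((hmem a).mp (List.mem_cons.mpr (Or.inr ha))) with h | h
          · exact absurd (h ▸ hr) (fun hc => asym x x hc hc)
          · exact h
        · intro ha
          have hr : r x a := (List.pairwise_cons.mp hy).1 a ha
          rcases List.mem_cons.mp ((hmem a).mpr (List.mem_cons.mpr (Or.inr ha))) with h | h
          · exact absurd (h ▸ hr) (fun hc => asym x x hc hc)
          · exact h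
      rw [ih ys (List.pairwise_cons.mp hx).2 (List.pairwise_cons.mp hy).2 htail]

-- set.update with a duplicate-free batch appends exactly the not-yet-present elements, in order.
lemma pv_update_eq {α : Type} [BEq α] [LawfulBEq α] :
    ∀ (ys : List α), ys.Nodup → ∀ (s : PySem.Set α),
      PySem.Set.update s ys = s ++ ys.filter (fun y => !s.contains y) := by
  intro ys
  induction ys with
  | nil => intro _ s; simp [PySem.Set.update]
  | cons y ys ih =>
    intro hnd s
    have hy_not : y ∉ ys := (List.nodup_cons.mp hnd).1
    have hupd : PySem.Set.update s (y :: ys) = PySem.Set.update (PySem.Set.add s y) ys := rfl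
    by_cases hc : s.contains y = true
    · have hm : y ∈ s := List.contains_iff_mem.mp hc
      have hadd : PySem.Set.add s y = s := by simp [PySem.Set.add, hm]
      rw [hupd, hadd, ih (List.nodup_cons.mp hnd).2 s]
      simp [hm]
    · have hm : y ∉ s := fun h => hc (List.contains_iff_mem.mpr h)
      have hadd : PySem.Set.add s y = s ++ [y] := by simp [PySem.Set.add, hm]
      rw [hupd, hadd, ih (List.nodup_cons.mp hnd).2 (s ++ [y])]
      have hfc : ys.filter (fun z => !(s ++ [y]).contains z) = ys.filter (fun z => !s.contains z) := by
        apply List.filter_congr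
        intro z hz
        have hzy : z ≠ y := fun h => hy_not (h ▸ hz)
        simp [hzy]
      rw [hfc]
      simp [hm, List.append_assoc]

lemma pv_ofList_nodup {α : Type} [BEq α] [LawfulBEq α] (xs : List α) (h : xs.Nodup) :
    PySem.Set.ofList xs = xs := by
  have he : PySem.Set.ofList xs = PySem.Set.update [] xs := rfl
  rw [he, pv_update_eq xs h []]
  simp

-- The hash-backed helpers compute exactly the PySem.Set operations.
lemma pvSetUpdate_eq (s : PySem.Set (Int × Int)) (xs : List (Int × Int)) :
    pvSetUpdate s xs = PySem.Set.update s xs := by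
  suffices h : ∀ (xs : List (Int × Int)) (rcur : List (Int × Int)) (hs : Std.HashSet (Int × Int)),
      (∀ y, hs.contains y = List.contains rcur.reverse y) →
      (xs.foldl pvSetStep (rcur, hs)).1.reverse = PySem.Set.update rcur.reverse xs by
    have h0 : ∀ y : Int × Int, (Std.HashSet.ofList s).contains y = List.contains s.reverse.reverse y := by
      intro y; rw [List.reverse_reverse]; exact Std.HashSet.contains_ofList
    have := h xs s.reverse (Std.HashSet.ofList s) h0
    rwa [List.reverse_reverse] at this
  intro xs
  induction xs with
  | nil => intro rcur hs _; rfl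
  | cons x xs ih =>
    intro rcur hs hinv
    have hupd : PySem.Set.update rcur.reverse (x :: xs) = PySem.Set.update (PySem.Set.add rcur.reverse x) xs := rfl
    by_cases hc : hs.contains x = true
    · have hlc : List.contains rcur.reverse x = true := by rw [← hinv x]; exact hc
      have hm : x ∈ rcur.reverse := List.contains_iff_mem.mp hlc
      have hadd : PySem.Set.add rcur.reverse x = rcur.reverse := by simp [PySem.Set.add, hm]
      have hstep : pvSetStep (rcur, hs) x = (rcur, hs) := by simp [pvSetStep, hc]
      rw [List.foldl_cons, hstep, hupd, hadd]
      exact ih rcur hs hinv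
    · have hlc : ¬ List.contains rcur.reverse x = true := by rw [← hinv x]; exact hc
      have hm : x ∉ rcur.reverse := fun h => hlc (List.contains_iff_mem.mpr h)
      have hadd : PySem.Set.add rcur.reverse x = rcur.reverse ++ [x] := by simp [PySem.Set.add, hm]
      have hstep : pvSetStep (rcur, hs) x = (x :: rcur, hs.insert x) := by simp [pvSetStep, hc]
      rw [List.foldl_cons, hstep, hupd, hadd]
      have hrev : (x :: rcur).reverse = rcur.reverse ++ [x] := by simp
      rw [← hrev]
      apply ih
      intro y
      rw [Std.HashSet.contains_insert, hinv y, hrev]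
      have hbd : (x == y) = decide (x = y) := by by_cases h : x = y <;> simp [h]
      simp [hbd, eq_comm, Bool.or_comm]

lemma pvSetOfList_eq (xs : List (Int × Int)) : pvSetOfList xs = PySem.Set.ofList xs := by
  rw [pvSetOfList, pvSetUpdate_eq]; rfl

lemma pvSetDiff_eq (s t : PySem.Set (Int × Int)) : pvSetDiff s t = PySem.Set.diff s t := by
  unfold pvSetDiff PySem.Set.diff
  simp only [Std.HashSet.contains_ofList]
  rfl

-- The clamped row range lists exactly the in-grid rows among row_index-1, row_index, row_index+1.
lemma pv_rows (ri rlen : Int) :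
    PySem.List.pyRange (max 0 (ri - 1)) (min (ri + 2) rlen) =
      ((if 0 ≤ ri - 1 ∧ ri - 1 < rlen then [ri - 1] else []) ++
       (if 0 ≤ ri ∧ ri < rlen then [ri] else []) ++
       (if 0 ≤ ri + 1 ∧ ri + 1 < rlen then [ri + 1] else [])) := by
  apply pv_eq_of_pairwise (r := (· < · : Int → Int → Prop)) (fun a b h1 h2 => by omega)
  · exact PySem.List.pairwise_lt_pyRange_one _ _
  · split_ifs <;> simp
  · intro a
    rw [PySem.List.mem_pyRange_one]
    split_ifs <;> simp <;> omega

-- Membership in A's result.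
lemma pv_memA (ri f l rlen clen x1 x2 : Int) :
    (x1, x2) ∈ get_valid_coordinates ri f l rlen clen ↔
      (max 0 (ri - 1) ≤ x1 ∧ x1 < min (ri + 2) rlen ∧
       max 0 (f - 1) ≤ x2 ∧ x2 < min (l + 2) clen ∧
       ¬(x1 = ri ∧ f ≤ x2 ∧ x2 < l + 1)) := by
  unfold get_valid_coordinates
  simp only [pvSetDiff_eq, pvSetOfList_eq]
  simp [PySem.Set.diff, List.mem_filter, PySem.Set.mem_ofList, List.mem_flatMap, List.mem_map,
    PySem.List.mem_pyRange_one, PySem.Set.contains, Prod.ext_iff]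
  omega

-- Membership in B's result (same characterisation).
lemma pv_memB (ri f l rlen clen x1 x2 : Int) :
    (x1, x2) ∈ get_valid_coordinates_alt ri f l rlen clen ↔
      (max 0 (ri - 1) ≤ x1 ∧ x1 < min (ri + 2) rlen ∧
       max 0 (f - 1) ≤ x2 ∧ x2 < min (l + 2) clen ∧
       ¬(x1 = ri ∧ f ≤ x2 ∧ x2 < l + 1)) := by
  unfold get_valid_coordinates_alt
  simp only [pvSetUpdate_eq]
  split_ifs with h1 h2 h3 <;>
    simp [PySem.Set.mem_update, PySem.Set.empty, List.mem_map, PySem.List.mem_pyRange_one,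
      Prod.ext_iff] <;> omega

-- Pairwise row-major sortedness of A's result.
lemma pv_pwA (ri f l rlen clen : Int) :
    (get_valid_coordinates ri f l rlen clen).Pairwise pvLex := by
  unfold get_valid_coordinates
  simp only [pvSetDiff_eq, pvSetOfList_eq]
  rw [pv_rows]
  apply List.Pairwise.filter
  have hpw : ∀ (xs : List Int), xs.Pairwise (· < ·) →
      (xs.flatMap (fun row => (PySem.List.pyRange (max 0 (f - 1)) (min (l + 2) clen)).map
        (fun column => (row, column)))).Pairwise pvLex := by
    intro xs hxs
    induction xs with
    | nil => simp
    | cons x xs ih =>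
      simp only [List.flatMap_cons]
      rw [List.pairwise_append]
      refine ⟨?_, ih (List.pairwise_cons.mp hxs).2, ?_⟩
      · rw [List.pairwise_map]
        exact (PySem.List.pairwise_lt_pyRange_one _ _).imp (fun h => Or.inr ⟨rfl, h⟩)
      · intro a ha b hb
        simp only [List.mem_map, List.mem_flatMap] at ha hb
        obtain ⟨c, _, rfl⟩ := ha
        obtain ⟨r, hr, c', _, rfl⟩ := hb
        exact Or.inl ((List.pairwise_cons.mp hxs).1 r hr)
  have hrows : ((if 0 ≤ ri - 1 ∧ ri - 1 < rlen then [ri - 1] else []) ++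
       (if 0 ≤ ri ∧ ri < rlen then [ri] else []) ++
       (if 0 ≤ ri + 1 ∧ ri + 1 < rlen then [ri + 1] else []) : List Int).Pairwise (· < ·) := by
    split_ifs <;> simp
  have h := hpw _ hrows
  rw [pv_ofList_nodup _ (h.imp (fun {a b} hab => by
    intro he; subst he; exact pvLex_asym a a hab hab))]
  exact h

-- update preserves row-major sortedness when new elements come lex-after surviving old ones.
lemma pv_pw_update (s : PySem.Set (Int × Int)) (ys : List (Int × Int)) (hnd : ys.Nodup)
    (hs : s.Pairwise pvLex) (hy : ys.Pairwise pvLex)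
    (hcross : ∀ a ∈ s, ∀ b ∈ ys, b ∉ s → pvLex a b) :
    (PySem.Set.update s ys).Pairwise pvLex := by
  rw [pv_update_eq ys hnd s]
  rw [List.pairwise_append]
  refine ⟨hs, hy.filter _, ?_⟩
  intro a ha b hb
  rw [List.mem_filter] at hb
  refine hcross a ha b hb.1 (fun h => ?_)
  have hb2 := hb.2
  simp [PySem.Set.contains] at hb2
  exact hb2 h

-- Pairwise row-major sortedness of B's result.
lemma pv_pwB (ri f l rlen clen : Int) :
    (get_valid_coordinates_alt ri f l rlen clen).Pairwise pvLex := by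
  have hnd : ∀ (r a b : Int), ((PySem.List.pyRange a b).map (fun c => (r, c))).Nodup :=
    fun r a b => (PySem.List.nodup_pyRange_one a b).map (fun c c' h => by
      simpa using congrArg Prod.snd h)
  have hstrip : ∀ (r a b : Int), ((PySem.List.pyRange a b).map (fun c => (r, c))).Pairwise pvLex :=
    fun r a b => List.pairwise_map.mpr
      ((PySem.List.pairwise_lt_pyRange_one a b).imp (fun h => Or.inr ⟨rfl, h⟩))
  have hemp : (PySem.Set.empty : PySem.Set (Int × Int)).Pairwise pvLex := by
    simp [PySem.Set.empty]
  unfold get_valid_coordinates_alt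
  simp only [pvSetUpdate_eq]
  split_ifs with h1 h2 h3 <;>
  · repeat' apply pv_pw_update _ _ (hnd _ _ _)
    all_goals
      first
      | exact hemp
      | exact hstrip _ _ _
      | (intro a ha b hb hbn
         obtain ⟨a1, a2⟩ := a
         obtain ⟨b1, b2⟩ := b
         simp [pvLex, PySem.Set.mem_update, PySem.Set.empty, List.mem_map,
           PySem.List.mem_pyRange_one, Prod.ext_iff] at ha hb hbn ⊢
         try omega)

-- ===== VERDICT (by name: the statement is the Claim_ definition above) =====
theorem get_valid_coordinates_spec : Claim_equal_get_valid_coordinates := by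
  intro ri f l rlen clen _
  unfold Spec_get_valid_coordinates
  apply pv_eq_of_pairwise pvLex_asym _ _ (pv_pwA ri f l rlen clen) (pv_pwB ri f l rlen clen)
  intro a
  obtain ⟨a1, a2⟩ := a
  rw [pv_memA, pv_memB]
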